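-- pv_equiv track=rewrite | github.com/pypi-data/pypi-mirror-43 | packages/lettercase/lettercase-0.1.0-py3-none-any.whl/lettercase/converters/dromedary_case.py | pascal_to_dromedary_case
-- ===== SOURCE A (Python) =====
-- from typing import List
--
-- def pascal_to_dromedary_case(text: str) -> str:
--     """Convert from PascalCase to dromedaryCase."""
--     chars: List[str] = []
--     found_alnum: bool = False
--
--     for char in text:
--         if not found_alnum and char.isalnum():
--             char = char.lower()
--             found_alnum = True
--
--         chars.append(char)
--
--     return "".join(chars)
-- ===== SOURCE B (Python) =====
-- def pascal_to_dromedary_case(text: str) -> str: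
--     """Convert from PascalCase to dromedaryCase."""
--     for i, char in enumerate(text):
--         if char.isalnum():
--             return text[:i] + char.lower() + text[i + 1:]
--     return text
-- ===== Notes on version B (the rewrite author's own statement) =====
-- stated objective: simpler
-- what changed: Replaces the whole-string character-by-character list accumulation with a found_alnum flag by locating the index of the first alphanumeric character and splicing its lowercased form between two string slices, returning text unchanged if none exists.
import Mathlib
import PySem

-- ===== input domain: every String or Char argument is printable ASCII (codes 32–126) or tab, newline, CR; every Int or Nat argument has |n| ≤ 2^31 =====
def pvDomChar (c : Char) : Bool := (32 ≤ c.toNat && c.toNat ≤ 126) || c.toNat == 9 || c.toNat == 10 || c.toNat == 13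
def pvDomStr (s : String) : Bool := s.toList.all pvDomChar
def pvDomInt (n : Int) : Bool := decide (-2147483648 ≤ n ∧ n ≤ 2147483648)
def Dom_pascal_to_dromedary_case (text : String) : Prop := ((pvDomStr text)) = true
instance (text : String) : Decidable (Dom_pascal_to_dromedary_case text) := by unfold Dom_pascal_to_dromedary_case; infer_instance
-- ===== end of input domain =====

-- B locates the first alphanumeric character and splices; A accumulates every character with a flag. Objective: simpler.

-- ===== PORT A =====
-- literal port of A's loop: state = (chars, found_alnum), one append per character, join at the end
def pascal_to_dromedary_case (text : String) : String :=
  let st := text.toList.foldl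
    (fun (st : List Char × Bool) char =>
      if !st.2 && PySem.Chars.isalnum char then
        (st.1 ++ [PySem.Chars.lowerChar char], true)
      else
        (st.1 ++ [char], st.2))
    ([], false)
  String.mk st.1

-- ===== PORT B =====
-- literal port of B: find the index of the first alnum char, then splice text[:i] + lower + text[i+1:]
def pascal_to_dromedary_case_alt (text : String) : String :=
  match text.toList.findIdx? (fun c => PySem.Chars.isalnum c) with
  | none => text
  | some i =>
    let cs := text.toList
    String.mk (cs.take i ++ [PySem.Chars.lowerChar cs[i]!] ++ cs.drop (i + 1))

-- ===== PRECONDITION & SPEC =====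
def Spec_pascal_to_dromedary_case (text : String) (out : String) : Prop := out = pascal_to_dromedary_case_alt text
instance (text : String) (out : String) : Decidable (Spec_pascal_to_dromedary_case text out) := by unfold Spec_pascal_to_dromedary_case; infer_instance

-- ===== CLAIM (what is proved, stated in full; the proofs are below) =====
def Claim_equal_pascal_to_dromedary_case : Prop := ∀ (text : String), Dom_pascal_to_dromedary_case text → Spec_pascal_to_dromedary_case text (pascal_to_dromedary_case text)

-- ===== LEMMAS AND PROOFS =====

-- B's splice, at the list level
def pvSplice (cs : List Char) : List Char :=
  match cs.findIdx? (fun c => PySem.Chars.isalnum c) with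
  | none => cs
  | some i => cs.take i ++ [PySem.Chars.lowerChar cs[i]!] ++ cs.drop (i + 1)

-- A's step function
def pvStep (st : List Char × Bool) (char : Char) : List Char × Bool :=
  if !st.2 && PySem.Chars.isalnum char then
    (st.1 ++ [PySem.Chars.lowerChar char], true)
  else
    (st.1 ++ [char], st.2)

theorem pvFoldl_true (cs : List Char) : ∀ acc : List Char,
    cs.foldl pvStep (acc, true) = (acc ++ cs, true) := by
  induction cs with
  | nil => intro acc; simp
  | cons c cs ih =>
    intro acc
    simp only [List.foldl_cons, pvStep, Bool.not_true, Bool.false_and, Bool.false_eq_true,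
      if_false]
    rw [ih]
    simp

theorem pvSplice_cons_pos (c : Char) (cs : List Char)
    (h : PySem.Chars.isalnum c = true) :
    pvSplice (c :: cs) = PySem.Chars.lowerChar c :: cs := by
  simp [pvSplice, List.findIdx?_cons, h]

theorem pvSplice_cons_neg (c : Char) (cs : List Char)
    (h : PySem.Chars.isalnum c = false) :
    pvSplice (c :: cs) = c :: pvSplice cs := by
  unfold pvSplice
  rw [List.findIdx?_cons, if_neg (by simp [h])]
  cases hf : cs.findIdx? (fun c => PySem.Chars.isalnum c) with
  | none => simp
  | some i =>
    simp only [Option.map_some]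
    have hget : (c :: cs)[i + 1]! = cs[i]! := by
      simp [List.getElem!_eq_getElem?_getD, List.getElem?_cons_succ]
    rw [hget]
    simp [List.take_succ_cons, List.drop_succ_cons]

theorem pvFoldl_false (cs : List Char) : ∀ acc : List Char,
    (cs.foldl pvStep (acc, false)).1 = acc ++ pvSplice cs := by
  induction cs with
  | nil => intro acc; simp [pvSplice]
  | cons c cs ih =>
    intro acc
    by_cases h : PySem.Chars.isalnum c = true
    · simp only [List.foldl_cons, pvStep, Bool.not_false, Bool.true_and, if_pos h]
      rw [pvFoldl_true, pvSplice_cons_pos c cs h]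
      simp
    · have h' : PySem.Chars.isalnum c = false := by simpa using h
      simp only [List.foldl_cons, pvStep, h', Bool.and_false, Bool.false_eq_true, if_false]
      rw [ih (acc ++ [c]), pvSplice_cons_neg c cs h']
      simp

-- ===== VERDICT (by name: the statement is the Claim_ definition above) =====
theorem pascal_to_dromedary_case_spec : Claim_equal_pascal_to_dromedary_case := by
  intro text _
  show pascal_to_dromedary_case text = pascal_to_dromedary_case_alt text
  have hfold := pvFoldl_false text.toList []
  simp only [List.nil_append] at hfold
  unfold pascal_to_dromedary_case pascal_to_dromedary_case_alt
  show String.mk (List.foldl pvStep ([], false) text.toList).1 = _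
  rw [hfold]
  unfold pvSplice
  cases h : text.toList.findIdx? (fun c => PySem.Chars.isalnum c) with
  | none => exact String.ofList_toList
  | some i => rfl
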